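-- pv_equiv track=rewrite | github.com/scshafe/multi-interface-tic-tac-toe | src/interfaces/ncursesterminal/printers.py | create_circle_piece
-- ===== SOURCE A (Python) =====
-- def create_circle_piece(size):
--     circle = [[" " for i in range(size*2)] for j in range(size*2)]
--     for i in range(size):
--         it_left = size-1-i
--         it_right = size + i
--         # top left
--         circle[i][it_left] = '/'
--         #top right
--         circle[i][it_right] = '\\'
--         # bottom left
--         circle[len(circle)-1-i][it_left] = '\\'
--         # bottom right
--         circle[len(circle)-1-i][it_right] = '/'
--     return circle
-- ===== SOURCE B (Python) =====
-- def create_circle_piece(size):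
--     return [[('/' if (r < size and c == size - 1 - r) or (r >= size and c == 3 * size - 1 - r)
--               else '\\' if (r < size and c == size + r) or (r >= size and c == r - size)
--               else ' ')
--              for c in range(2 * size)]
--             for r in range(2 * size)]
-- ===== Notes on version B (the rewrite author's own statement) =====
-- stated objective: simpler
-- what changed: B computes each cell's character directly from coordinate tests in a single nested comprehension instead of A's build-blank-grid-then-overwrite-four-diagonals mutation loop.
import Mathlib
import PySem

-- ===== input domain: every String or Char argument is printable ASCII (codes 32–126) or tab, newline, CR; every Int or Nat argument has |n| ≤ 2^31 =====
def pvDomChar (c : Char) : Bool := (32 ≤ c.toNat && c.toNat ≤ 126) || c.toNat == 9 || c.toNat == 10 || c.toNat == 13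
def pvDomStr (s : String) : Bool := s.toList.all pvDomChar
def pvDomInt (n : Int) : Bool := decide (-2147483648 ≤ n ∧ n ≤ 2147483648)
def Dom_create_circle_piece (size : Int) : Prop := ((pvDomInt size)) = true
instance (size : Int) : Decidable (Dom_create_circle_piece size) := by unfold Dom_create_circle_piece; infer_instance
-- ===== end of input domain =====

-- B computes every cell directly from coordinate tests in one nested comprehension
-- instead of A's fill-with-blanks-then-overwrite loop (objective: simpler).

-- ===== PORT A =====
-- circle[i][j] = v  (indices are nonnegative and in range at every call site of the loop,
-- so the total pySetD/pyGetD forms are exact here)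
def setCellA (g : List (List String)) (i j : Int) (v : String) : List (List String) :=
  PySem.List.pySetD g i (PySem.List.pySetD (PySem.List.pyGetD g i []) j v)

def create_circle_piece (size : Int) : List (List String) :=
  let circle := (PySem.List.pyRange 0 (size * 2) 1).map (fun _j =>
    (PySem.List.pyRange 0 (size * 2) 1).map (fun _i => " "))
  (PySem.List.pyRange 0 size 1).foldl (fun circle i =>
    let it_left := size - 1 - i
    let it_right := size + i
    let circle := setCellA circle i it_left "/"
    let circle := setCellA circle i it_right "\\"
    let circle := setCellA circle (PySem.List.len circle - 1 - i) it_left "\\"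
    setCellA circle (PySem.List.len circle - 1 - i) it_right "/") circle

-- ===== PORT B =====
def create_circle_piece_alt (size : Int) : List (List String) :=
  (PySem.List.pyRange 0 (2 * size) 1).map (fun r =>
    (PySem.List.pyRange 0 (2 * size) 1).map (fun c =>
      if (r < size ∧ c = size - 1 - r) ∨ (size ≤ r ∧ c = 3 * size - 1 - r) then "/"
      else if (r < size ∧ c = size + r) ∨ (size ≤ r ∧ c = r - size) then "\\"
      else " "))

-- ===== PRECONDITION & SPEC =====
def Spec_create_circle_piece (size : Int) (out : List (List String)) : Prop := out = create_circle_piece_alt size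
instance (size : Int) (out : List (List String)) : Decidable (Spec_create_circle_piece size out) := by unfold Spec_create_circle_piece; infer_instance

-- ===== CLAIM (what is proved, stated in full; the proofs are below) =====
def Claim_equal_create_circle_piece : Prop := ∀ (size : Int), Dom_create_circle_piece size → Spec_create_circle_piece size (create_circle_piece size)

-- ===== LEMMAS AND PROOFS =====

-- the state of A's grid after the first k loop iterations, cell by cell
def cellF (size k r c : Int) : String :=
  if (r < k ∧ c = size - 1 - r) ∨ (2 * size - k ≤ r ∧ c = 3 * size - 1 - r) then "/"
  else if (r < k ∧ c = size + r) ∨ (2 * size - k ≤ r ∧ c = r - size) then "\\"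
  else " "

def gridF (size k : Int) : List (List String) :=
  (PySem.List.pyRange 0 (2 * size) 1).map (fun r =>
    (PySem.List.pyRange 0 (2 * size) 1).map (fun c => cellF size k r c))

theorem set_map_pyRange {α : Type} (g : Int → α) (m i : Int) (v : α)
    (h0 : 0 ≤ i) :
    ((PySem.List.pyRange 0 m 1).map g).set i.toNat v
      = (PySem.List.pyRange 0 m 1).map (fun r => if r = i then v else g r) := by
  apply List.ext_getElem
  · simp
  · intro t ht1 ht2
    simp only [List.length_set, List.length_map, PySem.List.length_pyRange_one] at ht1
    rw [List.getElem_set]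
    simp only [List.getElem_map, PySem.List.getElem_pyRange_one]
    have : ((0 : Int) + t = i) ↔ (t = i.toNat) := by omega
    split_ifs with hA hB hB <;> simp_all

theorem setCellA_gridlike (f : Int → Int → String) (m i j : Int) (v : String)
    (hi0 : 0 ≤ i) (hi1 : i < m) (hj0 : 0 ≤ j) (_hj1 : j < m) :
    setCellA ((PySem.List.pyRange 0 m 1).map (fun r => (PySem.List.pyRange 0 m 1).map (f r))) i j v
      = (PySem.List.pyRange 0 m 1).map (fun r => (PySem.List.pyRange 0 m 1).map
          (fun c => if r = i ∧ c = j then v else f r c)) := by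
  unfold setCellA
  rw [PySem.List.pyGetD_map_pyRange_of_nonneg _ m i _ hi0 hi1,
      PySem.List.pySetD_of_nonneg _ _ hj0,
      PySem.List.pySetD_of_nonneg _ _ hi0,
      set_map_pyRange _ m j v hj0,
      set_map_pyRange _ m i _ hi0]
  apply List.map_congr_left
  intro r hr
  rw [PySem.List.mem_pyRange_one] at hr
  by_cases hri : r = i
  · subst hri
    simp only [reduceIte]
    apply List.map_congr_left
    intro c hc
    by_cases hcj : c = j <;> simp [hcj]
  · simp only [if_neg hri]
    apply List.map_congr_left
    intro c hc
    simp [hri]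

theorem len_gridlike (f : Int → Int → String) (m : Int) (hm : 0 ≤ m) :
    PySem.List.len ((PySem.List.pyRange 0 m 1).map (fun r => (PySem.List.pyRange 0 m 1).map (f r))) = m := by
  simp only [PySem.List.len_eq, List.length_map, PySem.List.length_pyRange_one]
  omega

theorem loop_invariant (size : Int) (hs : 0 < size) (k : Nat) (hk : (k : Int) ≤ size) :
    (PySem.List.pyRange 0 (k : Int) 1).foldl (fun circle i =>
      setCellA
        (setCellA (setCellA (setCellA circle i (size - 1 - i) "/") i (size + i) "\\")
          (PySem.List.len (setCellA (setCellA circle i (size - 1 - i) "/") i (size + i) "\\") - 1 - i)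
          (size - 1 - i) "\\")
        (PySem.List.len
              (setCellA (setCellA (setCellA circle i (size - 1 - i) "/") i (size + i) "\\")
                (PySem.List.len (setCellA (setCellA circle i (size - 1 - i) "/") i (size + i) "\\") -
                    1 -
                  i)
                (size - 1 - i) "\\") -
            1 -
          i)
        (size + i) "/") (gridF size 0)
    = gridF size k := by
  induction k with
  | zero => simp
  | succ k ih =>
    have hk' : (k : Int) ≤ size := by push_cast at hk ⊢; omega
    have hsplit : PySem.List.pyRange 0 ((k : Nat) + 1 : Nat) 1
        = PySem.List.pyRange 0 (k : Int) 1 ++ [(k : Int)] := by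
      have := PySem.List.pyRange_one_succ_right (a := 0) (b := (k : Int)) (by positivity)
      push_cast
      exact this
    rw [hsplit, List.foldl_append, ih hk']
    simp only [List.foldl_cons, List.foldl_nil]
    -- now one step: apply the four cell writes to gridF size k
    have hkpos : (0 : Int) ≤ (k : Int) := by positivity
    have hklt : (k : Int) < size := by omega
    unfold gridF
    rw [setCellA_gridlike _ (2 * size) k (size - 1 - k) "/" (by omega) (by omega) (by omega) (by omega)]
    rw [setCellA_gridlike _ (2 * size) k (size + k) "\\" (by omega) (by omega) (by omega) (by omega)]
    rw [len_gridlike _ (2 * size) (by omega)]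
    rw [setCellA_gridlike _ (2 * size) (2 * size - 1 - k) (size - 1 - k) "\\" (by omega) (by omega) (by omega) (by omega)]
    rw [len_gridlike _ (2 * size) (by omega)]
    rw [setCellA_gridlike _ (2 * size) (2 * size - 1 - k) (size + k) "/" (by omega) (by omega) (by omega) (by omega)]
    apply List.map_congr_left
    intro r hr
    rw [PySem.List.mem_pyRange_one] at hr
    apply List.map_congr_left
    intro c hc
    rw [PySem.List.mem_pyRange_one] at hc
    unfold cellF
    push_cast
    split_ifs <;> first | rfl | omega

-- ===== VERDICT (by name: the statement is the Claim_ definition above) =====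
theorem create_circle_piece_spec : Claim_equal_create_circle_piece := by
  intro size _
  unfold Spec_create_circle_piece create_circle_piece create_circle_piece_alt
  by_cases hs : size ≤ 0
  · rw [PySem.List.pyRange_one_eq_nil (by omega), PySem.List.pyRange_one_eq_nil (by omega),
        PySem.List.pyRange_one_eq_nil (by omega)]
    simp
  · push Not at hs
    have hinit : (PySem.List.pyRange 0 (size * 2) 1).map (fun _j =>
        (PySem.List.pyRange 0 (size * 2) 1).map (fun _i => " ")) = gridF size 0 := by
      unfold gridF
      have h2 : size * 2 = 2 * size := by ring
      rw [h2]
      apply List.map_congr_left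
      intro r hr
      rw [PySem.List.mem_pyRange_one] at hr
      apply List.map_congr_left
      intro c hc
      rw [PySem.List.mem_pyRange_one] at hc
      unfold cellF
      split_ifs <;> first | rfl | omega
    obtain ⟨n, rfl⟩ : ∃ n : Nat, size = (n : Int) := ⟨size.toNat, by omega⟩
    simp only [hinit]
    rw [loop_invariant (n : Int) hs n le_rfl]
    unfold gridF
    apply List.map_congr_left
    intro r hr
    rw [PySem.List.mem_pyRange_one] at hr
    apply List.map_congr_left
    intro c hc
    rw [PySem.List.mem_pyRange_one] at hc
    unfold cellF
    split_ifs <;> first | rfl | omega
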